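-- pv_equiv track=rewrite | github.com/PeanLutHuynh/Assignment_AI | Lab_01/Hello_problem.py | dls_hello
-- ===== SOURCE A (Python) =====
-- GOAL = 'HELLO WORLD'
--
-- class HelloProblem:
--
--     def __init__(self, initial_state=''):
--         self.initial_state = initial_state
--
--     def actions(self, state):
--         if len(state) < len(GOAL):
--             return list(' ABCDEFGHIJKLMNOPQRSTUVWXYZ')
--         return []
--
--     def result(self, state, action):
--         return state + action
--
--     def is_goal(self, state):
--         return state == GOAL
--
--     def get_cost(self, state, action):
--         return 1
--
-- def is_promising_path(state):
--     """Relaxed heuristic - cho phép sai vài ký tự"""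
--     if len(state) > len(GOAL):
--         return False
--     if len(state) == 0:
--         return True
--
--     # Tính số ký tự khác nhau
--     differences = sum(1 for i, char in enumerate(state)
--                      if i < len(GOAL) and char != GOAL[i])
--
--     # Cho phép sai tối đa 2 ký tự hoặc 20%
--     max_errors = max(1, min(2, len(state) // 5))
--     return differences <= max_errors
--
-- def dls_hello(current='', limit=11, path=None, visited=None):
--     problem = HelloProblem()
--
--     if path is None:
--         path = [current]
--     if visited is None:
--         visited = set()
--
--     if problem.is_goal(current):
--         return path
--
--     if limit <= 0 or current in visited:
--         return None
--
--     # Ưu tiên đường đúng nhưng cho phép thử khác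
--     if not is_promising_path(current):
--         return None
--
--     visited.add(current)
--
--     for action in problem.actions(current):
--         next_state = problem.result(current, action)
--         if next_state not in visited:
--             if is_promising_path(next_state):
--                 result = dls_hello(next_state, limit - 1, path + [next_state], visited.copy())
--                 if result:
--                     return result
--     return None
-- ===== SOURCE B (Python) =====
-- GOAL = 'HELLO WORLD'
--
-- def dls_hello(current='', limit=11, path=None, visited=None):
--     # Closed form: the search can only reach GOAL by appending the missing
--     # suffix one character at a time, so the answer is the direct prefix
--     # chain -- no search needed.  (A also mutates `visited`; B does not:
--     # equivalence is about the return value.)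
--     if path is None:
--         path = [current]
--     if visited is None:
--         visited = set()
--     if current == GOAL:
--         return path
--     n = len(current)
--     if not GOAL.startswith(current):
--         return None
--     if limit < len(GOAL) - n:
--         return None
--     steps = [GOAL[:k] for k in range(n + 1, len(GOAL) + 1)]
--     if current in visited or any(s in visited for s in steps):
--         return None
--     return path + steps
-- ===== Notes on version B (the rewrite author's own statement) =====
-- stated objective: simpler
-- what changed: A runs a depth-limited recursive DFS over all 27-letter extensions with a mismatch-tolerant pruning heuristic; B observes that the goal is reachable only by appending GOAL's missing suffix character by character, so it returns the unique prefix chain (or None) directly in closed form, checking only the prefix relation, the depth limit and the visited set.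
import Mathlib
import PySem

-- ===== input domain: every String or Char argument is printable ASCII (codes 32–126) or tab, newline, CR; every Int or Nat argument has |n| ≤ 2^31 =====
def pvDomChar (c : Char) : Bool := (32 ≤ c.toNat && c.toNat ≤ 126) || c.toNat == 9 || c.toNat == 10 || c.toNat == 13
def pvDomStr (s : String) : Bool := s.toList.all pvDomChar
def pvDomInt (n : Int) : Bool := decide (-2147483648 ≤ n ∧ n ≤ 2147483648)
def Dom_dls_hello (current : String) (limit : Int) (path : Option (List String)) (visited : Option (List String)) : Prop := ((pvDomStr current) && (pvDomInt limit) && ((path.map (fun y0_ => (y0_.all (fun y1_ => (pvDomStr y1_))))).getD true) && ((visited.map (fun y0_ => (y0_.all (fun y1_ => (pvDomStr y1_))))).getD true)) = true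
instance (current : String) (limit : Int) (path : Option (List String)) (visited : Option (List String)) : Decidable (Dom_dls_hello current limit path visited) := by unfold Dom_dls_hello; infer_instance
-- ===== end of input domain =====

-- B replaces A's depth-limited recursive DFS by the closed-form prefix chain: the goal is
-- reachable only by appending GOAL's missing suffix character by character, so the unique
-- successful path is computed directly in closed form (objective: simpler).  A also mutates its `visited`
-- argument (adds `current`); B does not — the equivalence proved here is about the return value.


-- ===== PORT A =====
-- GOAL = 'HELLO WORLD'
def pvGoal : List Char := "HELLO WORLD".toList

-- HelloProblem.actions
def pvActions (state : List Char) : List Char :=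
  if state.length < pvGoal.length then " ABCDEFGHIJKLMNOPQRSTUVWXYZ".toList else []

-- is_promising_path; the Python guard `i < len(GOAL)` makes GOAL[i] total, so pvGoal[i]? is exact
def pvPromising (state : List Char) : Bool :=
  if state.length > pvGoal.length then false
  else if state.length = 0 then true
  else
    let differences :=
      (PySem.List.enumerate state).countP
        (fun p => decide (p.1 < (pvGoal.length : Int)) && (pvGoal[p.1.toNat]? != some p.2))
    let maxErrors := max 1 (min 2 (state.length / 5))
    decide (differences ≤ maxErrors)

-- the recursion; Python's Int depth with the `limit <= 0` test at every level is ported as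
-- Nat fuel `limit.toNat` (exact: both stop at the same depth); `visited.add(current)` followed
-- by `visited.copy()` per branch means each child receives visited ∪ {current}
def pvDlsA (fuel : Nat) (current : List Char) (path : List String) (visited : PySem.Set String) : Option (List String) :=
  if current = pvGoal then some path
  else
    match fuel with
    | 0 => none
    | n + 1 =>
      if String.ofList current ∈ visited then none
      else if !(pvPromising current) then none
      else
        let visited' := PySem.Set.add visited (String.ofList current)
        (pvActions current).findSome? (fun a =>
          let next := current ++ [a]
          if String.ofList next ∈ visited' then none
          else if pvPromising next then
            match pvDlsA n next (path ++ [String.ofList next]) visited' with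
            | some res => if res = [] then none else some res  -- Python: `if result: return result`
            | none => none
          else none)

def dls_hello (current : String) (limit : Int) (path : Option (List String)) (visited : Option (List String)) : Option (List String) :=
  let p := path.getD [current]
  let vis : PySem.Set String := PySem.Set.ofList (visited.getD [])
  pvDlsA limit.toNat current.toList p vis

-- ===== PORT B =====
def dls_hello_alt (current : String) (limit : Int) (path : Option (List String)) (visited : Option (List String)) : Option (List String) :=
  let p := path.getD [current]
  let vis := visited.getD []
  let cur := current.toList
  if cur = pvGoal then some p
  else if ¬ (pvGoal.take cur.length = cur) then none  -- not GOAL.startswith(current)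
  else if limit < (pvGoal.length : Int) - (cur.length : Int) then none
  else
    let steps := (List.range' (cur.length + 1) (pvGoal.length - cur.length)).map
      (fun k => String.ofList (pvGoal.take k))
    if current ∈ vis ∨ steps.any (fun s => decide (s ∈ vis)) then none
    else some (p ++ steps)

-- ===== PRECONDITION & SPEC =====
def Spec_dls_hello (current : String) (limit : Int) (path : Option (List String)) (visited : Option (List String)) (out : Option (List String)) : Prop := out = dls_hello_alt current limit path visited
instance (current : String) (limit : Int) (path : Option (List String)) (visited : Option (List String)) (out : Option (List String)) : Decidable (Spec_dls_hello current limit path visited out) := by unfold Spec_dls_hello; infer_instance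

-- ===== CLAIM (what is proved, stated in full; the proofs are below) =====
def Claim_equal_dls_hello : Prop := ∀ (current : String) (limit : Int) (path : Option (List String)) (visited : Option (List String)), Dom_dls_hello current limit path visited → Spec_dls_hello current limit path visited (dls_hello current limit path visited)

-- ===== LEMMAS AND PROOFS =====

-- the common characterisation of both programs' value
def pvSpec (fuel : Nat) (cur : List Char) (path : List String) (vis : List String) : Option (List String) :=
  if cur = pvGoal then some path
  else if pvGoal.take cur.length = cur ∧ 11 - cur.length ≤ fuel
        ∧ String.ofList cur ∉ vis
        ∧ ∀ k ∈ List.range' (cur.length + 1) (11 - cur.length), String.ofList (pvGoal.take k) ∉ vis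
  then some (path ++ (List.range' (cur.length + 1) (11 - cur.length)).map (fun k => String.ofList (pvGoal.take k)))
  else none

lemma pvGoal_len : pvGoal.length = 11 := by decide

lemma pv_take_len {cur : List Char} (h : pvGoal.take cur.length = cur) : cur.length ≤ 11 := by
  have := congrArg List.length h
  simp [List.length_take, pvGoal_len] at this
  omega

lemma pv_take_lt {cur : List Char} (h : pvGoal.take cur.length = cur) (hne : cur ≠ pvGoal) :
    cur.length < 11 := by
  rcases Nat.lt_or_ge cur.length 11 with h' | h'
  · exact h'
  · exact absurd (h ▸ (List.take_of_length_le (l := pvGoal) (by rw [pvGoal_len]; omega))) (by simpa using hne)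

lemma pv_promising_take : ∀ n, n ≤ 11 → pvPromising (pvGoal.take n) = true := by
  intro n h; interval_cases n <;> decide

lemma pv_take_succ : ∀ n, n < 11 → pvGoal.take (n + 1) = pvGoal.take n ++ [pvGoal.getD n ' '] := by
  intro n h; interval_cases n <;> decide

lemma pv_goalChar_mem : ∀ n, n < 11 → pvGoal.getD n ' ' ∈ " ABCDEFGHIJKLMNOPQRSTUVWXYZ".toList := by
  intro n h; interval_cases n <;> decide

lemma pv_findSome?_eq_of_mem {α β : Type} [DecidableEq α] {l : List α} {f : α → Option β} {c : α}
    (hc : c ∈ l) (h : ∀ a ∈ l, a ≠ c → f a = none) : l.findSome? f = f c := by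
  induction l with
  | nil => cases hc
  | cons a t ih =>
    rw [List.findSome?_cons]
    by_cases hac : a = c
    · subst hac
      cases hfc : f a with
      | some b => simp
      | none =>
        have ht : t.findSome? f = none := by
          rw [List.findSome?_eq_none_iff]
          intro x hx
          by_cases hxc : x = a
          · subst hxc; exact hfc
          · exact h x (List.mem_cons_of_mem _ hx) hxc
        simp [ht]
    · rw [h a List.mem_cons_self hac]
      have hct : c ∈ t := by
        rcases List.mem_cons.mp hc with h' | h'
        · exact absurd h'.symm hac
        · exact h'
      exact ih hct (fun x hx => h x (List.mem_cons_of_mem _ hx))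

lemma pv_prefix_pop {cur : List Char} {a : Char} (h : pvGoal.take (cur.length + 1) = cur ++ [a]) :
    pvGoal.take cur.length = cur := by
  have := congrArg (List.take cur.length) h
  rwa [List.take_take, min_eq_left (Nat.le_succ _), List.take_left] at this

lemma pv_spec_not_prefix {fuel : Nat} {next : List Char} {p : List String} {v : List String}
    (h : ¬ (pvGoal.take next.length = next)) : pvSpec fuel next p v = none := by
  have hne : next ≠ pvGoal := by
    rintro rfl; exact h (by rw [List.take_length])
  unfold pvSpec
  rw [if_neg hne, if_neg (by rintro ⟨h1, -⟩; exact h h1)]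

lemma pv_spec_congr_vis {fuel : Nat} {cur : List Char} {p : List String} {v₁ v₂ : List String}
    (h : ∀ s, s ∈ v₁ ↔ s ∈ v₂) : pvSpec fuel cur p v₁ = pvSpec fuel cur p v₂ := by
  unfold pvSpec
  refine if_congr Iff.rfl rfl (if_congr ?_ rfl rfl)
  constructor
  · rintro ⟨h1, h2, h3, h4⟩; exact ⟨h1, h2, fun hm => h3 ((h _).mpr hm), fun k hk hm => h4 k hk ((h _).mpr hm)⟩
  · rintro ⟨h1, h2, h3, h4⟩; exact ⟨h1, h2, fun hm => h3 ((h _).mp hm), fun k hk hm => h4 k hk ((h _).mp hm)⟩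

lemma pv_take_ne {cur : List Char} {k : Nat} (hk : k ≤ 11) (hne : k ≠ cur.length) :
    String.ofList (pvGoal.take k) ≠ String.ofList cur := by
  intro h
  have h2 := congrArg List.length (String.ofList_inj.mp h)
  simp [List.length_take, pvGoal_len] at h2
  omega

lemma pv_dlsA_eq : ∀ (fuel : Nat) (cur : List Char) (path : List String) (vis : List String),
    pvDlsA fuel cur path vis = pvSpec fuel cur path vis := by
  intro fuel
  induction fuel with
  | zero =>
    intro cur path vis
    by_cases hg : cur = pvGoal
    · simp [pvDlsA, pvSpec, hg]
    · have h0 : pvDlsA 0 cur path vis = none := by simp [pvDlsA, hg]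
      rw [h0]
      unfold pvSpec
      rw [if_neg hg, if_neg (by rintro ⟨h1, h2, -⟩; have := pv_take_lt h1 hg; omega)]
  | succ m ih =>
    intro cur path vis
    by_cases hg : cur = pvGoal
    · simp [pvDlsA, pvSpec, hg]
    · rw [show pvDlsA (m + 1) cur path vis =
        (if String.ofList cur ∈ vis then none
         else if !(pvPromising cur) then none
         else (pvActions cur).findSome? (fun a =>
            if String.ofList (cur ++ [a]) ∈ PySem.Set.add vis (String.ofList cur) then none
            else if pvPromising (cur ++ [a]) then
              match pvDlsA m (cur ++ [a]) (path ++ [String.ofList (cur ++ [a])])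
                  (PySem.Set.add vis (String.ofList cur)) with
              | some res => if res = [] then none else some res
              | none => none
            else none)) from by rw [pvDlsA]; rw [if_neg hg]]
      by_cases hv : String.ofList cur ∈ vis
      · rw [if_pos hv]
        unfold pvSpec
        rw [if_neg hg, if_neg (by rintro ⟨-, -, h3, -⟩; exact h3 hv)]
      · rw [if_neg hv]
        cases hp : pvPromising cur with
        | false =>
          rw [if_pos (by decide)]
          unfold pvSpec
          rw [if_neg hg, if_neg]
          rintro ⟨h1, -⟩
          have hT := pv_promising_take cur.length (pv_take_len h1)
          rw [h1, hp] at hT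
          exact absurd hT (by simp)
        | true =>
          rw [if_neg (by decide)]
          by_cases hpre : pvGoal.take cur.length = cur
          · have hlt : cur.length < 11 := pv_take_lt hpre hg
            have hact : pvActions cur = " ABCDEFGHIJKLMNOPQRSTUVWXYZ".toList := by
              unfold pvActions; rw [if_pos (by rw [pvGoal_len]; omega)]
            have hsucc := pv_take_succ cur.length hlt
            have hnext : cur ++ [pvGoal.getD cur.length ' '] = pvGoal.take (cur.length + 1) := by
              rw [hsucc, hpre]
            rw [hact, pv_findSome?_eq_of_mem (pv_goalChar_mem cur.length hlt)
              (by
                intro a ha hane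
                have hnp : ¬ (pvGoal.take (cur ++ [a]).length = cur ++ [a]) := by
                  intro hcontra
                  rw [show (cur ++ [a]).length = cur.length + 1 from by simp, hsucc, hpre] at hcontra
                  simp only [List.append_cancel_left_eq, List.cons.injEq, and_true] at hcontra
                  exact hane hcontra.symm
                by_cases h1 : String.ofList (cur ++ [a]) ∈ PySem.Set.add vis (String.ofList cur)
                · rw [if_pos h1]
                · rw [if_neg h1]
                  cases h2 : pvPromising (cur ++ [a]) with
                  | false => simp
                  | true =>
                    rw [if_pos rfl, ih, pv_spec_not_prefix hnp])]
            rw [hnext]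
            have hne1 : String.ofList (pvGoal.take (cur.length + 1)) ≠ String.ofList cur :=
              pv_take_ne (cur := cur) (k := cur.length + 1) (by omega) (by omega)
            have hmem_iff : String.ofList (pvGoal.take (cur.length + 1)) ∈ PySem.Set.add vis (String.ofList cur)
                ↔ String.ofList (pvGoal.take (cur.length + 1)) ∈ vis := by
              rw [PySem.Set.mem_add]
              constructor
              · rintro (h | h)
                · exact h
                · exact absurd h hne1
              · exact fun h => Or.inl h
            by_cases hvn : String.ofList (pvGoal.take (cur.length + 1)) ∈ vis
            · rw [if_pos (hmem_iff.mpr hvn)]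
              unfold pvSpec
              rw [if_neg hg, if_neg]
              rintro ⟨-, -, -, h4⟩
              exact h4 (cur.length + 1) (by rw [List.mem_range']; exact ⟨0, by omega, by omega⟩) hvn
            · rw [if_neg (by rw [hmem_iff]; exact hvn)]
              rw [if_pos (pv_promising_take _ (by omega)), ih]
              rcases Nat.lt_or_ge (cur.length + 1) 11 with h11 | h11
              · -- the successor state is still a proper prefix
                have hlen1 : (pvGoal.take (cur.length + 1)).length = cur.length + 1 := by
                  rw [List.length_take, pvGoal_len]; omega
                have hng : pvGoal.take (cur.length + 1) ≠ pvGoal := by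
                  intro h; have := congrArg List.length h; rw [hlen1, pvGoal_len] at this; omega
                have hmemtail : ∀ k ∈ List.range' (cur.length + 1 + 1) (11 - (cur.length + 1)),
                    (String.ofList (pvGoal.take k) ∈ PySem.Set.add vis (String.ofList cur)
                      ↔ String.ofList (pvGoal.take k) ∈ vis) := by
                  intro k hk
                  rcases List.mem_range'.mp hk with ⟨i, hi, rfl⟩
                  rw [PySem.Set.mem_add]
                  have hne := pv_take_ne (cur := cur) (k := cur.length + 1 + 1 + 1 * i)
                    (by omega) (by omega)
                  constructor
                  · rintro (h | h)
                    · exact h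
                    · exact absurd h hne
                  · exact fun h => Or.inl h
                unfold pvSpec
                rw [if_neg hng, if_neg hg, hlen1]
                rw [show 11 - cur.length = (11 - (cur.length + 1)) + 1 from by omega,
                  List.range'_succ, List.map_cons]
                by_cases hrest : 11 - (cur.length + 1) ≤ m
                    ∧ ∀ k ∈ List.range' (cur.length + 1 + 1) (11 - (cur.length + 1)),
                        String.ofList (pvGoal.take k) ∉ vis
                · rw [if_pos ⟨rfl, hrest.1, fun hin => hvn (hmem_iff.mp hin),
                      fun k hk hin => hrest.2 k hk ((hmemtail k hk).mp hin)⟩,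
                    if_pos ⟨hpre, by omega, hv, List.forall_mem_cons.mpr ⟨hvn, hrest.2⟩⟩]
                  simp
                · have hinner : ¬ (List.take (cur.length + 1) pvGoal = List.take (cur.length + 1) pvGoal
                      ∧ 11 - (cur.length + 1) ≤ m
                      ∧ String.ofList (List.take (cur.length + 1) pvGoal) ∉ PySem.Set.add vis (String.ofList cur)
                      ∧ ∀ k ∈ List.range' (cur.length + 1 + 1) (11 - (cur.length + 1)),
                          String.ofList (List.take k pvGoal) ∉ PySem.Set.add vis (String.ofList cur)) := by
                    rintro ⟨-, h2, -, h4⟩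
                    exact hrest ⟨h2, fun k hk hin => (h4 k hk) ((hmemtail k hk).mpr hin)⟩
                  have houter : ¬ (List.take cur.length pvGoal = cur
                      ∧ 11 - (cur.length + 1) + 1 ≤ m + 1
                      ∧ String.ofList cur ∉ vis
                      ∧ ∀ k ∈ (cur.length + 1) :: List.range' (cur.length + 1 + 1) (11 - (cur.length + 1)),
                          String.ofList (List.take k pvGoal) ∉ vis) := by
                    rintro ⟨-, h2, -, h4⟩
                    have h4' := List.forall_mem_cons.mp h4
                    exact hrest ⟨by omega, h4'.2⟩
                  rw [if_neg hinner, if_neg houter]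
              · -- the successor state is GOAL itself
                have h11' : cur.length + 1 = 11 := by omega
                have hgoal : pvGoal.take (cur.length + 1) = pvGoal := by
                  rw [h11', ← pvGoal_len, List.take_length]
                rw [hgoal]
                unfold pvSpec
                rw [if_pos rfl]
                have h4 : ∀ k ∈ List.range' (cur.length + 1) (11 - cur.length),
                    String.ofList (List.take k pvGoal) ∉ vis := by
                  intro k hk
                  rw [show 11 - cur.length = 1 from by omega, List.range'_one,
                    List.mem_singleton] at hk
                  subst hk
                  exact hgoal ▸ hvn
                rw [if_neg hg, if_pos ⟨hpre, by omega, hv, h4⟩]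
                rw [show 11 - cur.length = 1 from by omega, List.range'_one, List.map_singleton]
                simp [hgoal]
          · unfold pvSpec
            rw [if_neg hg, if_neg (by rintro ⟨h1, -⟩; exact hpre h1), List.findSome?_eq_none_iff]
            intro a ha
            have hnp : ¬ (pvGoal.take (cur ++ [a]).length = cur ++ [a]) := by
              intro hcontra
              rw [show (cur ++ [a]).length = cur.length + 1 from by simp] at hcontra
              exact hpre (pv_prefix_pop hcontra)
            by_cases h1 : String.ofList (cur ++ [a]) ∈ PySem.Set.add vis (String.ofList cur)
            · rw [if_pos h1]
            · rw [if_neg h1]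
              cases h2 : pvPromising (cur ++ [a]) with
              | false => simp
              | true => rw [if_pos rfl, ih, pv_spec_not_prefix hnp]

lemma pv_alt_eq (current : String) (limit : Int) (path : Option (List String)) (visited : Option (List String)) :
    dls_hello_alt current limit path visited
      = pvSpec limit.toNat current.toList (path.getD [current]) (visited.getD []) := by
  unfold dls_hello_alt pvSpec
  simp only [pvGoal_len]
  by_cases hg : current.toList = pvGoal
  · simp [hg]
  · rw [if_neg hg, if_neg hg]
    by_cases hpre : pvGoal.take current.toList.length = current.toList
    · have hlt : current.toList.length < 11 := pv_take_lt hpre hg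
      rw [if_neg (not_not_intro hpre)]
      by_cases hfit : limit < ((11 : Nat) : Int) - (current.toList.length : Int)
      · rw [if_pos hfit, if_neg]
        rintro ⟨-, h2, -⟩
        omega
      · rw [if_neg hfit]
        have hiff : (current ∈ visited.getD [] ∨
            ((List.map (fun k => String.ofList (List.take k pvGoal))
                (List.range' (current.toList.length + 1) (11 - current.toList.length))).any
              fun s => decide (s ∈ visited.getD [])) = true)
            ↔ ¬ (String.ofList current.toList ∉ visited.getD []
              ∧ ∀ k ∈ List.range' (current.toList.length + 1) (11 - current.toList.length),
                String.ofList (pvGoal.take k) ∉ visited.getD []) := by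
          simp only [List.any_map, Function.comp_def, List.any_eq_true, decide_eq_true_eq,
            String.ofList_toList, Classical.not_and_iff_not_or_not, not_not, not_forall]
          tauto
        by_cases hmem : String.ofList current.toList ∉ visited.getD []
            ∧ ∀ k ∈ List.range' (current.toList.length + 1) (11 - current.toList.length),
                String.ofList (pvGoal.take k) ∉ visited.getD []
        · rw [if_neg (by rw [hiff]; exact not_not_intro hmem),
            if_pos ⟨hpre, by omega, hmem.1, hmem.2⟩]
        · rw [if_pos (hiff.mpr hmem), if_neg (by rintro ⟨-, -, h3, h4⟩; exact hmem ⟨h3, h4⟩)]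
    · rw [if_pos (by exact hpre), if_neg (by rintro ⟨h1, -⟩; exact hpre h1)]

-- ===== VERDICT (by name: the statement is the Claim_ definition above) =====
theorem dls_hello_spec : Claim_equal_dls_hello := by
  intro current limit path visited _
  unfold Spec_dls_hello dls_hello
  rw [pv_dlsA_eq, pv_alt_eq]
  exact pv_spec_congr_vis (fun s => PySem.Set.mem_ofList _ s)
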